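-- pv_equiv track=rewrite | github.com/jailway/AdventofCode | day 08/day08.py | read_values
-- ===== SOURCE A (Python) =====
-- def read_values(input: [int], position: int = 0) -> (int, int):
--     """
--     Reads values recursively
--
--     :param input: input list of nodes
--     :param position: starting position in the list (default 0)
--     :return: tuple (length of the node, value of node)
--     """
--     metalength = input[position + 1]
--     length = 2
--     subnodes = input[position]
--     if subnodes == 0:
--         return length + metalength, sum(input[position + length:position + length + metalength])
--     subnodesvalues = []
--     for i in range(0, subnodes):
--         l, v = read_values(input, position + length)
--         length += l
--         subnodesvalues.append(v)
--     value = 0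
--     for i in input[position + length:position + length + metalength]:
--         if i > 0 and i <= subnodes:
--             value += subnodesvalues[i - 1]
--     return length + metalength, value
-- ===== SOURCE B (Python) =====
-- # B: two-phase re-implementation — a recursive-descent parser that builds an
-- # explicit tree (sub, metadata, children) with the end position, followed by a
-- # separate structural evaluator over that tree.
--
-- def _parse(input, pos):
--     sub = input[pos]
--     meta = input[pos + 1]
--     cur = pos + 2
--     children = []
--     for _ in range(sub):
--         child, cur = _parse(input, cur)
--         children.append(child)
--     metadata = input[cur:cur + meta]
--     return (sub, metadata, children), cur + meta
--
--
-- def _evaluate(node):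
--     sub, metadata, children = node
--     if sub == 0:
--         return sum(metadata)
--     values = [_evaluate(c) for c in children]
--     return sum(values[i - 1] for i in metadata if 0 < i <= sub)
--
--
-- def read_values(input, position=0):
--     tree, end = _parse(input, position)
--     return end - position, _evaluate(tree)
-- ===== Notes on version B (the rewrite author's own statement) =====
-- stated objective: alternative
-- what changed: A fuses parsing and evaluation into one index-juggling recursion returning (length, value); B first parses the encoding into an explicit tree (a recursive-descent parser returning the node and its end position) and then computes the value by a separate structural fold over that tree, with no index arithmetic in the evaluator.
import Mathlib
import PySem

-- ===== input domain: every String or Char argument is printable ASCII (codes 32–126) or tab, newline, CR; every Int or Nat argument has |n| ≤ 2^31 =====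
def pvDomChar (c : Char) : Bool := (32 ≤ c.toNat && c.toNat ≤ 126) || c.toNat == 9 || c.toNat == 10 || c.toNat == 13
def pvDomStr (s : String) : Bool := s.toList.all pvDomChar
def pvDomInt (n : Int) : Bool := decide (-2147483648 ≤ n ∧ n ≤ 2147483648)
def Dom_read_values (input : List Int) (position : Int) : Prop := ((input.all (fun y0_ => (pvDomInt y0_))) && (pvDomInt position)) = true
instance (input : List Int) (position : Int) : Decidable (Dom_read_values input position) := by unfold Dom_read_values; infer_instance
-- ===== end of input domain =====

-- B replaces A's fused index-juggling recursion by a two-phase design: a recursive-descent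
-- parser building an explicit tree, then a separate structural evaluator (alternative
-- decomposition, same cost; return values agree wherever A returns).

-- ===== PORT A =====
-- A's inner loop 'for i in range(0, subnodes)' as recursion over the remaining
-- iteration count; the recursive call on the decremented fuel is passed in as `step`.
def rvAKids (step : Int → Option (Int × Int)) : Nat → Int → List Int → Option (Int × List Int)
  | 0, length, vals => some (length, vals)
  | n + 1, length, vals =>
    match step length with
    | none => none
    | some (l, v) => rvAKids step n (length + l) (vals ++ [v])

-- Literal port of A; `fuel` bounds only the recursion DEPTH (none = IndexError or
-- unbounded recursion, i.e. Python raises).  Depth 2*input.length+3 suffices for every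
-- input on which Python A returns (positions along a call chain are distinct valid indices).
def rvA (input : List Int) : Nat → Int → Option (Int × Int)
  | 0, _ => none
  | fuel + 1, position =>
    match PySem.List.pyGet? input (position + 1), PySem.List.pyGet? input position with
    | some metalength, some subnodes =>
      if subnodes = 0 then
        some (2 + metalength,
          (PySem.List.slice input (some (position + 2)) (some (position + 2 + metalength))).sum)
      else
        match rvAKids (fun len => rvA input fuel (position + len)) subnodes.toNat 2 [] with
        | none => none
        | some (length, subnodesvalues) =>
          some (length + metalength,
            (PySem.List.slice input (some (position + length)) (some (position + length + metalength))).foldl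
              (fun value i => if 0 < i ∧ i ≤ subnodes then value + (PySem.List.pyGet? subnodesvalues (i - 1)).getD 0 else value) 0)
    | _, _ => none

def read_values (input : List Int) (position : Int) : Int × Int :=
  (rvA input (2 * input.length + 3) position).getD (0, 0)

-- ===== PORT B =====
-- Explicit tree built by B's parser (children as a mutually inductive forest).
mutual
inductive PvTree : Type where
  | node : Int → List Int → PvForest → PvTree
inductive PvForest : Type where
  | nil : PvForest
  | cons : PvTree → PvForest → PvForest
end

def pvParseKids (step : Int → Option (PvTree × Int)) : Nat → Int → Option (PvForest × Int)
  | 0, cur => some (.nil, cur)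
  | n + 1, cur =>
    match step cur with
    | none => none
    | some (child, cur') =>
      match pvParseKids step n cur' with
      | none => none
      | some (rest, cur'') => some (.cons child rest, cur'')

-- _parse of Source B: returns the node and the end position (same depth fuel as rvA).
def pvParse (input : List Int) : Nat → Int → Option (PvTree × Int)
  | 0, _ => none
  | fuel + 1, pos =>
    match PySem.List.pyGet? input pos, PySem.List.pyGet? input (pos + 1) with
    | some sub, some mcount =>
      match pvParseKids (fun c => pvParse input fuel c) sub.toNat (pos + 2) with
      | none => none
      | some (children, cur) =>
        some (.node sub (PySem.List.slice input (some cur) (some (cur + mcount))) children, cur + mcount)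
    | _, _ => none

-- _evaluate of Source B: structural fold over the tree.
mutual
def pvEval : PvTree → Int
  | .node sub metadata children =>
    if sub = 0 then metadata.sum
    else
      let values := pvEvalForest children
      metadata.foldl (fun acc i => if 0 < i ∧ i ≤ sub then acc + (PySem.List.pyGet? values (i - 1)).getD 0 else acc) 0
def pvEvalForest : PvForest → List Int
  | .nil => []
  | .cons t ts => pvEval t :: pvEvalForest ts
end

def read_values_alt (input : List Int) (position : Int) : Int × Int :=
  match pvParse input (2 * input.length + 3) position with
  | none => (0, 0)
  | some (tree, endPos) => (endPos - position, pvEval tree)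

-- ===== PRECONDITION & SPEC =====
-- Pre_: `input` encodes a complete header-tree at `position`.  That property IS the
-- grammar of the encoding, so it is stated as the grammar check pvShape (headers in
-- bounds, each node followed by its children and metadata); it computes no lengths'
-- arithmetic results and no values, only the end position.  Pre_ excludes exactly the
-- inputs on which Python A raises: IndexError on an out-of-range header read, or
-- RecursionError (a repeated position on a call chain makes A's recursion infinite;
-- depth 2*input.length+3 exceeds the number of distinct in-range positions, so the
-- depth fuel never cuts off a run on which A returns).
def pvShapeKids (step : Int → Option Int) : Nat → Int → Option Int
  | 0, cur => some cur
  | n + 1, cur =>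
    match step cur with
    | none => none
    | some cur' => pvShapeKids step n cur'

def pvShape (input : List Int) : Nat → Int → Option Int
  | 0, _ => none
  | fuel + 1, pos =>
    match PySem.List.pyGet? input pos, PySem.List.pyGet? input (pos + 1) with
    | some sub, some mcount =>
      match pvShapeKids (fun c => pvShape input fuel c) sub.toNat (pos + 2) with
      | none => none
      | some cur => some (cur + mcount)
    | _, _ => none

def Pre_read_values (input : List Int) (position : Int) : Prop :=
  (pvShape input (2 * input.length + 3) position).isSome = true
instance (input : List Int) (position : Int) : Decidable (Pre_read_values input position) := by
  unfold Pre_read_values; infer_instance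

def pvWitness_read_values : List Int × Int := ([0, 1, 5], 0)

def Spec_read_values (input : List Int) (position : Int) (out : Int × Int) : Prop := out = read_values_alt input position
instance (input : List Int) (position : Int) (out : Int × Int) : Decidable (Spec_read_values input position out) := by unfold Spec_read_values; infer_instance

-- ===== CLAIM (what is proved, stated in full; the proofs are below) =====
def Claim_equal_read_values : Prop := ∀ (input : List Int) (position : Int), Dom_read_values input position → Pre_read_values input position → Spec_read_values input position (read_values input position)

-- ===== LEMMAS AND PROOFS =====

-- pvShape succeeds ⇒ rvA succeeds, consuming exactly up to the end position.
theorem pvShape_rvA (input : List Int) :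
    ∀ fuel pos e, pvShape input fuel pos = some e →
      ∃ v, rvA input fuel pos = some (e - pos, v) := by
  intro fuel
  induction fuel with
  | zero => intro pos e h; simp [pvShape] at h
  | succ fuel ih =>
    intro pos e h
    have kids : ∀ n length vals cur', pvShapeKids (fun c => pvShape input fuel c) n (pos + length) = some cur' →
        ∃ vals', rvAKids (fun len => rvA input fuel (pos + len)) n length vals = some (cur' - pos, vals') := by
      intro n
      induction n with
      | zero =>
        intro length vals cur' hk
        simp [pvShapeKids] at hk
        exact ⟨vals, by simp [rvAKids]; omega⟩
      | succ n ihn =>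
        intro length vals cur' hk
        simp only [pvShapeKids] at hk
        cases hs : pvShape input fuel (pos + length) with
        | none => rw [hs] at hk; simp at hk
        | some cur1 =>
          rw [hs] at hk
          obtain ⟨v1, hv1⟩ := ih (pos + length) cur1 hs
          have heq : pos + (length + (cur1 - (pos + length))) = cur1 := by omega
          obtain ⟨vals', hvals'⟩ := ihn (length + (cur1 - (pos + length))) (vals ++ [v1]) cur' (by rw [heq]; exact hk)
          exact ⟨vals', by simp only [rvAKids, hv1]; exact hvals'⟩
    simp only [pvShape] at h
    cases hm : PySem.List.pyGet? input (pos + 1) with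
    | none => rw [hm] at h; cases hs : PySem.List.pyGet? input pos <;> rw [hs] at h <;> simp at h
    | some mcount =>
      cases hs : PySem.List.pyGet? input pos with
      | none => rw [hs, hm] at h; simp at h
      | some sub =>
        rw [hs, hm] at h
        simp only [] at h
        by_cases hzero : sub = 0
        · subst hzero
          simp only [Int.toNat_zero, pvShapeKids, Option.some.injEq] at h
          refine ⟨(PySem.List.slice input (some (pos + 2)) (some (pos + 2 + mcount))).sum, ?_⟩
          rw [show e - pos = 2 + mcount by omega]
          simp [rvA, hm, hs]
        · cases hk : pvShapeKids (fun c => pvShape input fuel c) sub.toNat (pos + 2) with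
          | none => rw [hk] at h; simp at h
          | some cur =>
            rw [hk] at h
            simp only [Option.some.injEq] at h
            obtain ⟨vals', hvals'⟩ := kids sub.toNat 2 [] cur hk
            refine ⟨(PySem.List.slice input (some (pos + (cur - pos))) (some (pos + (cur - pos) + mcount))).foldl
                (fun value i => if 0 < i ∧ i ≤ sub then value + (PySem.List.pyGet? vals' (i - 1)).getD 0 else value) 0, ?_⟩
            rw [show e - pos = cur - pos + mcount by omega]
            simp only [rvA, hm, hs, if_neg hzero, hvals']

-- rvA succeeds ⇒ B's parser builds a tree ending at the same position whose
-- evaluation is A's value.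
theorem rvA_parse_eval (input : List Int) :
    ∀ fuel pos l v, rvA input fuel pos = some (l, v) →
      ∃ t, pvParse input fuel pos = some (t, pos + l) ∧ pvEval t = v := by
  intro fuel
  induction fuel with
  | zero => intro pos l v h; simp [rvA] at h
  | succ fuel ih =>
    intro pos l v h
    have kids : ∀ n length vals len' vals',
        rvAKids (fun len => rvA input fuel (pos + len)) n length vals = some (len', vals') →
        ∃ ts, pvParseKids (fun c => pvParse input fuel c) n (pos + length) = some (ts, pos + len') ∧
          vals' = vals ++ pvEvalForest ts := by
      intro n
      induction n with
      | zero =>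
        intro length vals len' vals' hk
        simp [rvAKids] at hk
        exact ⟨.nil, by simp [pvParseKids, hk.1, pvEvalForest, hk.2]⟩
      | succ n ihn =>
        intro length vals len' vals' hk
        simp only [rvAKids] at hk
        cases hs : rvA input fuel (pos + length) with
        | none => rw [hs] at hk; simp at hk
        | some r =>
          obtain ⟨l1, v1⟩ := r
          rw [hs] at hk
          obtain ⟨t, ht, hev⟩ := ih (pos + length) l1 v1 hs
          obtain ⟨ts, hts, hvals⟩ := ihn (length + l1) (vals ++ [v1]) len' vals' hk
          refine ⟨.cons t ts, ?_, ?_⟩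
          · simp only [pvParseKids, ht]
            rw [show pos + length + l1 = pos + (length + l1) by omega, hts]
          · rw [hvals, ← hev]
            simp [pvEvalForest]
    simp only [rvA] at h
    cases hm : PySem.List.pyGet? input (pos + 1) with
    | none => rw [hm] at h; cases hs : PySem.List.pyGet? input pos <;> rw [hs] at h <;> simp at h
    | some mcount =>
      cases hs : PySem.List.pyGet? input pos with
      | none => rw [hs, hm] at h; simp at h
      | some sub =>
        rw [hm, hs] at h
        simp only [] at h
        by_cases hzero : sub = 0
        · subst hzero
          simp only [if_pos, Option.some.injEq, Prod.mk.injEq] at h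
          refine ⟨.node 0 (PySem.List.slice input (some (pos + 2)) (some (pos + 2 + mcount))) .nil, ?_, ?_⟩
          · simp only [pvParse, hs, hm, Int.toNat_zero, pvParseKids]
            rw [show pos + l = pos + 2 + mcount by omega]
          · simp only [pvEval, if_pos]
            exact h.2
        · simp only [if_neg hzero] at h
          cases hk : rvAKids (fun len => rvA input fuel (pos + len)) sub.toNat 2 [] with
          | none => rw [hk] at h; simp at h
          | some r =>
            obtain ⟨length, vals'⟩ := r
            rw [hk] at h
            simp only [Option.some.injEq, Prod.mk.injEq] at h
            obtain ⟨ts, hts, hvals⟩ := kids sub.toNat 2 [] length vals' hk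
            refine ⟨.node sub (PySem.List.slice input (some (pos + length)) (some (pos + length + mcount))) ts, ?_, ?_⟩
            · simp only [pvParse, hs, hm, hts]
              rw [show pos + l = pos + length + mcount by omega]
            · simp only [pvEval, if_neg hzero]
              simp only [List.nil_append] at hvals
              rw [← hvals, ← h.2]

-- ===== VERDICT (by name: the statement is the Claim_ definition above) =====
theorem read_values_spec : Claim_equal_read_values := by
  intro input position _hDom hPre
  unfold Pre_read_values at hPre
  obtain ⟨e, he⟩ := Option.isSome_iff_exists.mp hPre
  obtain ⟨v, hv⟩ := pvShape_rvA input (2 * input.length + 3) position e he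
  obtain ⟨t, ht, hev⟩ := rvA_parse_eval input (2 * input.length + 3) position (e - position) v hv
  unfold Spec_read_values read_values read_values_alt
  simp only [hv, ht, Option.getD_some, Prod.mk.injEq]
  exact ⟨by omega, hev.symm⟩
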